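-- pv_equiv track=rewrite | github.com/RikhardHonkanen/AdventOfCode | 1.py | find_first_number_as_string_indexes
-- ===== SOURCE A (Python) =====
-- numbers_as_words = {
--     "one":      "1",
--     "two":      "2",
--     "three":    "3",
--     "four":     "4",
--     "five":     "5",
--     "six":      "6",
--     "seven":    "7",
--     "eight":    "8",
--     "nine":     "9"
-- }
--
-- def find_first_number_as_string_indexes(cal, reverse = False):
--     word_index_map = []
--     for key in numbers_as_words.keys():
--         compare = key if not reverse else reverse_string(key)
--         if compare in cal:
--             word_index_map.append({ numbers_as_words[key]: cal.index(compare) })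
--         else:
--             word_index_map.append({ numbers_as_words[key]: -1 })
--     return word_index_map
--
-- def reverse_string(input):
--   return input[::-1]
-- ===== SOURCE B (Python) =====
-- numbers_as_words = {
--     "one":      "1",
--     "two":      "2",
--     "three":    "3",
--     "four":     "4",
--     "five":     "5",
--     "six":      "6",
--     "seven":    "7",
--     "eight":    "8",
--     "nine":     "9"
-- }
--
-- def find_first_number_as_string_indexes(cal, reverse = False):
--     # one position-driven pass over cal building the whole index table at once
--     words = list(numbers_as_words.keys())
--     targets = [w[::-1] if reverse else w for w in words]
--     found = [-1] * len(words)
--     for i in range(len(cal)):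
--         for j, t in enumerate(targets):
--             if found[j] == -1 and cal[i:i+len(t)] == t:
--                 found[j] = i
--     return [{numbers_as_words[w]: f} for w, f in zip(words, found)]
-- ===== Notes on version B (the rewrite author's own statement) =====
-- stated objective: alternative
-- what changed: Replaces the nine independent whole-string scans (a membership test followed by an index lookup per number word) with a single left-to-right pass over positions of cal that fills a nine-slot first-index table by testing each still-unset word for a match starting at the current position.
import Mathlib
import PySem

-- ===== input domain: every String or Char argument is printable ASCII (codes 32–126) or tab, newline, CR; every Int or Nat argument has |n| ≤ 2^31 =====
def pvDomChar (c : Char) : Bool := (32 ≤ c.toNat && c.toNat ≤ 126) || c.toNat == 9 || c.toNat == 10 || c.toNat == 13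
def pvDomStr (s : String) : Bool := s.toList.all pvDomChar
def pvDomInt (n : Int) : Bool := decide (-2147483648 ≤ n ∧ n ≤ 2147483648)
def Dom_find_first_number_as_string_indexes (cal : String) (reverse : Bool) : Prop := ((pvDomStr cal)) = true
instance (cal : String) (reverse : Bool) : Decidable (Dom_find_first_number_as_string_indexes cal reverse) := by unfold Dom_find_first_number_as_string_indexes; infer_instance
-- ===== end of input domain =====

-- B replaces A's nine whole-string scans (`in` + `.index` per word) by a single left-to-right
-- position scan that fills a 9-slot first-index table; objective: alternative (not measured faster).

-- the module constant numbers_as_words, as an ordered association list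
def pvWords : List (String × String) :=
  [("one","1"), ("two","2"), ("three","3"), ("four","4"), ("five","5"),
   ("six","6"), ("seven","7"), ("eight","8"), ("nine","9")]

-- ===== PORT A =====
-- reverse_string(input) = input[::-1]; by PySem.List.slice?_none_none_neg_one this is List.reverse.
-- Since `compare in cal` guards it, cal.index(compare) = PySem.Chars.find cal.toList compare.
def find_first_number_as_string_indexes (cal : String) (reverse : Bool) : List (List (String × Int)) :=
  pvWords.foldl
    (fun acc kv =>
      let compare := if !reverse then kv.1.toList else kv.1.toList.reverse
      if PySem.Chars.isIn compare cal.toList then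
        acc ++ [[(kv.2, PySem.Chars.find cal.toList compare)]]
      else
        acc ++ [[(kv.2, -1)]])
    []

-- ===== PORT B =====
-- cal[i:i+len(t)] is PySem.List.slice on cal.toList with natural bounds
def find_first_number_as_string_indexes_alt (cal : String) (reverse : Bool) : List (List (String × Int)) :=
  let l := cal.toList
  let targets := pvWords.map (fun kv => if reverse then kv.1.toList.reverse else kv.1.toList)
  let found := (List.range l.length).foldl
    (fun (fs : List Int) (i : Nat) => List.zipWith
      (fun (t : List Char) (f : Int) =>
        if f == -1 && (PySem.List.slice l (some (i : Int)) (some ((i : Int) + (t.length : Int))) == t)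
        then (i : Int) else f) targets fs)
    (List.replicate 9 (-1))
  List.zipWith (fun kv f => [(kv.2, f)]) pvWords found

-- ===== PRECONDITION & SPEC =====
def Spec_find_first_number_as_string_indexes (cal : String) (reverse : Bool) (out : List (List (String × Int))) : Prop := out = find_first_number_as_string_indexes_alt cal reverse
instance (cal : String) (reverse : Bool) (out : List (List (String × Int))) : Decidable (Spec_find_first_number_as_string_indexes cal reverse out) := by unfold Spec_find_first_number_as_string_indexes; infer_instance

-- ===== CLAIM (what is proved, stated in full; the proofs are below) =====
def Claim_equal_find_first_number_as_string_indexes : Prop := ∀ (cal : String) (reverse : Bool), Dom_find_first_number_as_string_indexes cal reverse → Spec_find_first_number_as_string_indexes cal reverse (find_first_number_as_string_indexes cal reverse)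

-- ===== LEMMAS AND PROOFS =====

lemma pv_zipWith_id {α : Type} (ts : List α) (fs : List Int) (h : fs.length ≤ ts.length) :
    List.zipWith (fun _ f => f) ts fs = fs := by
  induction ts generalizing fs with
  | nil => cases fs with
    | nil => rfl
    | cons a l => simp at h
  | cons t ts ih => cases fs with
    | nil => rfl
    | cons f fs => simp only [List.zipWith]; simp only [List.length_cons] at h; rw [ih fs (by omega)]

lemma pv_zipWith_zipWith {α : Type} (F G : α → Int → Int) (ts : List α) (fs : List Int) :
    List.zipWith F ts (List.zipWith G ts fs) = List.zipWith (fun t f => F t (G t f)) ts fs := by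
  induction ts generalizing fs with
  | nil => rfl
  | cons t ts ih => cases fs with
    | nil => rfl
    | cons f fs => simp only [List.zipWith]; rw [ih]

-- a fold of a componentwise (zipWith) update is the zipWith of componentwise folds
lemma pv_foldl_zipWith {α : Type} (g : Nat → α → Int → Int) (idx : List Nat) (ts : List α)
    (fs : List Int) (h : fs.length ≤ ts.length) :
    idx.foldl (fun fs i => List.zipWith (fun t f => g i t f) ts fs) fs
      = List.zipWith (fun t f => idx.foldl (fun f i => g i t f) f) ts fs := by
  induction idx generalizing fs with
  | nil => simp only [List.foldl_nil]; exact (pv_zipWith_id ts fs h).symm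
  | cons i idx ih =>
      simp only [List.foldl_cons]
      rw [ih (List.zipWith (fun t f => g i t f) ts fs)
            (by rw [List.length_zipWith]; omega)]
      rw [pv_zipWith_zipWith]

-- the single-slot scan computes `find` (guarded by `in`), for a nonempty pattern
lemma pv_slot (l t : List Char) (n : Int) (hn : n = (t.length : Int)) (ht : t ≠ []) :
    List.foldl
      (fun (f : Int) (i : Nat) =>
        if f = -1 ∧ PySem.List.slice l (some (i : Int)) (some ((i : Int) + n)) = t then (i : Int) else f)
      (-1) (List.range l.length)
      = if PySem.Chars.isIn t l then PySem.Chars.find l t else -1 := by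
  subst hn
  have hfun : (fun (f : Int) (i : Nat) =>
      if f = -1 ∧ PySem.List.slice l (some (i : Int)) (some ((i : Int) + (t.length : Int))) = t then (i : Int) else f)
      = (fun (f : Int) (i : Nat) => if f = -1 ∧ t <+: l.drop i then (i : Int) else f) := by
    funext f i
    have hiff : (PySem.List.slice l (some (i : Int)) (some ((i : Int) + (t.length : Int))) = t)
        ↔ t <+: l.drop i := by
      rw [PySem.List.slice_natCast_add, List.prefix_iff_eq_take]; exact eq_comm
    simp only [hiff]
  rw [hfun]
  -- invariant: after scanning positions [0, n) the slot holds the first match in that range, or -1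
  have inv : ∀ n : Nat,
      (((List.range n).foldl (fun f i => if f = -1 ∧ t <+: l.drop i then (i : Int) else f) (-1)) = -1
        ∧ ∀ j < n, ¬ t <+: l.drop j)
      ∨ (∃ k : Nat, ((List.range n).foldl (fun f i => if f = -1 ∧ t <+: l.drop i then (i : Int) else f) (-1)) = (k : Int)
        ∧ k < n ∧ t <+: l.drop k ∧ ∀ j < k, ¬ t <+: l.drop j) := by
    intro n
    induction n with
    | zero => exact Or.inl ⟨rfl, fun j hj => absurd hj (Nat.not_lt_zero j)⟩
    | succ n ih =>
        rw [List.range_succ, List.foldl_append, List.foldl_cons, List.foldl_nil]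
        rcases ih with ⟨hF, hnone⟩ | ⟨k, hF, hk, hpre, hmin⟩
        · rw [hF]
          by_cases hp : t <+: l.drop n
          · refine Or.inr ⟨n, by simp [hp], Nat.lt_succ_self n, hp, hnone⟩
          · refine Or.inl ⟨by simp [hp], ?_⟩
            intro j hj
            rcases Nat.lt_succ_iff_lt_or_eq.mp hj with h | h
            · exact hnone j h
            · subst h; exact hp
        · refine Or.inr ⟨k, ?_, by omega, hpre, hmin⟩
          rw [hF]
          have hne : ¬ ((k : Int) = -1) := by omega
          simp [hne]
  rcases inv l.length with ⟨hF, hnone⟩ | ⟨k, hF, hk, hpre, hmin⟩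
  · -- never found: t is not an infix of l
    have hni : ¬ t <:+: l := by
      intro hinf
      rcases (PySem.Chars.exists_prefix_drop_iff_isIn t l).mpr
        ((PySem.Chars.isIn_iff_infix t l).mpr hinf) with ⟨j, hj⟩
      by_cases hjl : j < l.length
      · exact hnone j hjl hj
      · have hdrop : l.drop j = [] := List.drop_eq_nil_of_le (by omega)
        rw [hdrop] at hj
        exact ht (List.prefix_nil.mp hj)
    rw [hF, if_neg (by rw [PySem.Chars.isIn_iff_infix]; simpa using hni)]
  · -- found at k: k is the first occurrence, i.e. find
    have hinf : t <:+: l := by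
      rcases hpre with ⟨s, hs⟩
      exact ⟨l.take k, s, by rw [List.append_assoc, hs, List.take_append_drop]⟩
    have hIn : PySem.Chars.isIn t l = true := (PySem.Chars.isIn_iff_infix t l).mpr hinf
    rw [hF, if_pos hIn]
    have hpos : 0 ≤ PySem.Chars.find l t := (PySem.Chars.find_nonneg_iff l t).mpr hinf
    rcases PySem.Chars.find_spec hpos with ⟨hfp, hfmin⟩
    have hkk : k = (PySem.Chars.find l t).toNat := by
      rcases lt_trichotomy k (PySem.Chars.find l t).toNat with h | h | h
      · exact absurd hpre (hfmin k h)
      · exact h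
      · exact absurd hfp (hmin _ h)
    rw [hkk]; omega

-- A as a map over pvWords
lemma pv_A_map (cal : String) (reverse : Bool) :
    find_first_number_as_string_indexes cal reverse
      = pvWords.map (fun kv =>
          let compare := if !reverse then kv.1.toList else kv.1.toList.reverse
          [(kv.2, if PySem.Chars.isIn compare cal.toList then PySem.Chars.find cal.toList compare else -1)]) := by
  unfold find_first_number_as_string_indexes
  have : ∀ (ws : List (String × String)) (acc : List (List (String × Int))),
      ws.foldl
        (fun acc kv =>
          let compare := if !reverse then kv.1.toList else kv.1.toList.reverse
          if PySem.Chars.isIn compare cal.toList then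
            acc ++ [[(kv.2, PySem.Chars.find cal.toList compare)]]
          else acc ++ [[(kv.2, -1)]]) acc
      = acc ++ ws.map (fun kv =>
          let compare := if !reverse then kv.1.toList else kv.1.toList.reverse
          [(kv.2, if PySem.Chars.isIn compare cal.toList then PySem.Chars.find cal.toList compare else -1)]) := by
    intro ws
    induction ws with
    | nil => intro acc; simp
    | cons kv ws ih =>
        intro acc
        simp only [List.foldl_cons, List.map_cons]
        by_cases h : PySem.Chars.isIn (if !reverse then kv.1.toList else kv.1.toList.reverse) cal.toList = true
        · simp only [h, if_pos]; rw [ih]; simp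
        · simp only [eq_false_of_ne_true h]; rw [ih]; simp
  rw [this]; simp

-- ===== VERDICT (by name: the statement is the Claim_ definition above) =====
theorem find_first_number_as_string_indexes_spec : Claim_equal_find_first_number_as_string_indexes := by
  intro cal reverse _
  unfold Spec_find_first_number_as_string_indexes
  unfold find_first_number_as_string_indexes_alt
  rw [pv_A_map]
  simp only []
  rw [pv_foldl_zipWith
        (fun (i : Nat) (t : List Char) (f : Int) =>
          if f == -1 && (PySem.List.slice cal.toList (some (i : Int)) (some ((i : Int) + (t.length : Int))) == t)
          then (i : Int) else f)
        (List.range cal.toList.length)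
        (pvWords.map (fun kv => if reverse then kv.1.toList.reverse else kv.1.toList))
        (List.replicate 9 (-1)) (by simp [pvWords])]
  cases reverse <;>
    simp [pvWords, List.zipWith, List.replicate] <;>
    refine ⟨?_, ?_, ?_, ?_, ?_, ?_, ?_, ?_, ?_⟩ <;>
    exact (pv_slot cal.toList _ _ (by decide) (by decide)).symm
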